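-- pv_equiv track=rewrite | github.com/eliottcassidy2000/math | 04-computation/two_three_tower_deep.py | compute_alpha_1_2
-- ===== SOURCE A (Python) =====
-- def compute_alpha_1_2(cycles):
--     alpha_1 = len(cycles)
--     alpha_2 = 0
--     for i in range(len(cycles)):
--         for j in range(i+1, len(cycles)):
--             if not (cycles[i] & cycles[j]):
--                 alpha_2 += 1
--     return alpha_1, alpha_2
-- ===== SOURCE B (Python) =====
-- def _ordered_pairs(idxs):
--     # all (idxs[a], idxs[b]) with a < b, peeling the head off a shrinking tail
--     out = []
--     rest = idxs
--     while rest: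
--         head, rest = rest[0], rest[1:]
--         out.extend((head, j) for j in rest)
--     return out
--
--
-- def compute_alpha_1_2(cycles):
--     n = len(cycles)
--     # inverted index: element -> list of cycle indices containing it (increasing)
--     index = {}
--     for i, cyc in enumerate(cycles):
--         for x in cyc:
--             index.setdefault(x, []).append(i)
--     # every unordered pair of cycles sharing at least one element
--     conflict = set()
--     for idxs in index.values():
--         conflict.update(_ordered_pairs(idxs))
--     return n, n * (n - 1) // 2 - len(conflict)
-- ===== Notes on version B (the rewrite author's own statement) =====
-- stated objective: alternative
-- what changed: Replaces A's nested scan over all cycle pairs with set intersections by a single pass building an inverted index (element -> cycle indices), collecting the intersecting index pairs it induces into a conflict set, and returning C(n,2) minus its size.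
import Mathlib
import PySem

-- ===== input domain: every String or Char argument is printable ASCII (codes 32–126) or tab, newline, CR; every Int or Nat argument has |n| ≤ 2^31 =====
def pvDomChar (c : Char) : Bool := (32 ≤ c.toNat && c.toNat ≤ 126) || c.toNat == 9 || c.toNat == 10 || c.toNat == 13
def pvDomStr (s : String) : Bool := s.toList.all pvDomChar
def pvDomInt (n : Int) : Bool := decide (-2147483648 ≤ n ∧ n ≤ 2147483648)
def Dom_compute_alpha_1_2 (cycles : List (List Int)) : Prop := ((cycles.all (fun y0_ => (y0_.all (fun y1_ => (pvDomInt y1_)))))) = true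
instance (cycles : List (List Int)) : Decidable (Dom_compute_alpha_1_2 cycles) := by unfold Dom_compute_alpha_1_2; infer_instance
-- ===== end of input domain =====

-- B replaces A's quadratic all-pairs set-intersection scan by an inverted index
-- (element -> cycle indices) and counts the intersecting pairs it induces; objective: alternative decomposition.

-- ===== PORT A =====
def compute_alpha_1_2 (cycles : List (List Int)) : Int × Int :=
  let alpha_1 : Int := PySem.List.len cycles
  let alpha_2 : Int :=
    (PySem.List.pyRange 0 (PySem.List.len cycles)).foldl (fun a2 i =>
      (PySem.List.pyRange (i + 1) (PySem.List.len cycles)).foldl (fun a2 j =>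
        if PySem.Set.inter (PySem.List.pyGetD cycles i []) (PySem.List.pyGetD cycles j []) = []
        then a2 + 1 else a2) a2) 0
  (alpha_1, alpha_2)

-- ===== PORT B =====
-- the 'while rest:' loop of _ordered_pairs: peel the head, append its pairs to out
def orderedPairs : List Int → List (Int × Int) → List (Int × Int)
  | [], out => out
  | head :: rest, out => orderedPairs rest (out ++ rest.map (fun j => (head, j)))

def compute_alpha_1_2_alt (cycles : List (List Int)) : Int × Int :=
  let n : Int := PySem.List.len cycles
  let index : PySem.Dict Int (List Int) :=
    (PySem.List.enumerate cycles).foldl (fun d p =>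
      p.2.foldl (fun d x => d.modify x [] (fun l => l ++ [p.1])) d) PySem.Dict.empty
  let conflict : PySem.Set (Int × Int) :=
    (PySem.Dict.values index).foldl (fun s idxs => PySem.Set.update s (orderedPairs idxs [])) PySem.Set.empty
  (n, PySem.Int.floordiv (n * (n - 1)) 2 - PySem.List.len conflict)

-- ===== PRECONDITION & SPEC =====
-- The Python parameter is a list of SETS; a List Int with duplicate elements encodes no Python
-- input, so Pre_ restricts to duplicate-free inner lists (the natural domain; A is never run
-- on anything else).
def Pre_compute_alpha_1_2 (cycles : List (List Int)) : Prop := ∀ c ∈ cycles, c.Nodup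
instance (cycles : List (List Int)) : Decidable (Pre_compute_alpha_1_2 cycles) := by unfold Pre_compute_alpha_1_2; infer_instance
def pvWitness_compute_alpha_1_2 : List (List Int) := [[1, 2], [2, 3], [4]]

def Spec_compute_alpha_1_2 (cycles : List (List Int)) (out : Int × Int) : Prop := out = compute_alpha_1_2_alt cycles
instance (cycles : List (List Int)) (out : Int × Int) : Decidable (Spec_compute_alpha_1_2 cycles out) := by unfold Spec_compute_alpha_1_2; infer_instance

-- ===== CLAIM (what is proved, stated in full; the proofs are below) =====
def Claim_equal_compute_alpha_1_2 : Prop := ∀ (cycles : List (List Int)), Dom_compute_alpha_1_2 cycles → Pre_compute_alpha_1_2 cycles → Spec_compute_alpha_1_2 cycles (compute_alpha_1_2 cycles)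

-- ===== LEMMAS AND PROOFS =====

-- pure form of orderedPairs: all (l[a], l[b]) with a < b
def opairs : List Int → List (Int × Int)
  | [] => []
  | h :: t => t.map (fun j => (h, j)) ++ opairs t

theorem orderedPairs_eq (l : List Int) : ∀ out, orderedPairs l out = out ++ opairs l := by
  induction l with
  | nil => intro out; simp [orderedPairs, opairs]
  | cons h t ih => intro out; simp [orderedPairs, opairs, ih]

theorem opairs_mem_fst {l : List Int} {y : Int × Int} (h : y ∈ opairs l) : y.1 ∈ l ∧ y.2 ∈ l := by
  induction l with
  | nil => simp [opairs] at h
  | cons a t ih =>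
    simp only [opairs, List.mem_append, List.mem_map] at h
    rcases h with ⟨j, hj, rfl⟩ | h
    · exact ⟨List.mem_cons_self, List.mem_cons_of_mem _ hj⟩
    · exact ⟨List.mem_cons_of_mem _ (ih h).1, List.mem_cons_of_mem _ (ih h).2⟩

theorem opairs_mem_of_sorted {l : List Int} (hs : l.Pairwise (· < ·)) (i j : Int) :
    (i, j) ∈ opairs l ↔ i ∈ l ∧ j ∈ l ∧ i < j := by
  induction l with
  | nil => simp [opairs]
  | cons a t ih =>
    rcases List.pairwise_cons.mp hs with ⟨ha, ht⟩
    constructor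
    · intro h
      simp only [opairs, List.mem_append, List.mem_map] at h
      rcases h with ⟨j', hj', he⟩ | h
      · cases he
        exact ⟨List.mem_cons_self, List.mem_cons_of_mem _ hj', ha _ hj'⟩
      · rcases (ih ht).mp h with ⟨h1, h2, h3⟩
        exact ⟨List.mem_cons_of_mem _ h1, List.mem_cons_of_mem _ h2, h3⟩
    · rintro ⟨hi, hj, hij⟩
      simp only [opairs, List.mem_append, List.mem_map]
      rcases List.mem_cons.mp hi with rfl | hi
      · rcases List.mem_cons.mp hj with rfl | hj
        · exact absurd hij (lt_irrefl _)
        · exact Or.inl ⟨j, hj, rfl⟩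
      · have hia : a < i := ha i hi
        rcases List.mem_cons.mp hj with rfl | hj
        · exact absurd (lt_trans hia hij) (lt_irrefl _)
        · exact Or.inr ((ih ht).mpr ⟨hi, hj, hij⟩)

theorem opairs_nodup {l : List Int} (hs : l.Pairwise (· < ·)) : (opairs l).Nodup := by
  induction l with
  | nil => simp [opairs]
  | cons a t ih =>
    rcases List.pairwise_cons.mp hs with ⟨ha, ht⟩
    have htn : t.Nodup := ht.imp (fun h => ne_of_lt h)
    refine List.nodup_append.mpr ⟨?_, ih ht, ?_⟩
    · exact htn.map (fun x y h => by cases h; rfl)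
    · intro y hy1 z hz
      rcases List.mem_map.mp hy1 with ⟨j, hj, rfl⟩
      rintro rfl
      have hma : a ∈ t := by simpa using (opairs_mem_fst hz).1
      exact lt_irrefl a (ha a hma)

theorem opairs_countP (q : Int × Int → Bool) (h : Int) (t : List Int) :
    (opairs (h :: t)).countP q = t.countP (fun j => q (h, j)) + (opairs t).countP q := by
  simp only [opairs, List.countP_append, List.countP_map]
  rfl

theorem opairs_length (l : List Int) : 2 * (opairs l).length + l.length = l.length * l.length := by
  induction l with
  | nil => simp [opairs]
  | cons a t ih =>
    simp only [opairs, List.length_append, List.length_map, List.length_cons]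
    have hr : (t.length + 1) * (t.length + 1) = t.length * t.length + 2 * t.length + 1 := by ring
    rw [hr]
    linarith [ih]

-- the flattened (element, index) pairs of the enumeration
def flatPairs (cycles : List (List Int)) (s : Int) : List (Int × Int) :=
  (PySem.List.enumerate cycles s).flatMap (fun p => p.2.map (fun x => (x, p.1)))

theorem flatPairs_cons (c : List Int) (cs : List (List Int)) (s : Int) :
    flatPairs (c :: cs) s = c.map (fun x => (x, s)) ++ flatPairs cs (s + 1) := by
  simp [flatPairs, PySem.List.enumerate_cons]

-- the index list one element x receives from the inverted-index dict
def occList (cycles : List (List Int)) (s : Int) (x : Int) : List Int :=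
  ((flatPairs cycles s).filter (fun q => q.1 == x)).map (fun q => q.2)

theorem occList_cons (c : List Int) (cs : List (List Int)) (s x : Int) :
    occList (c :: cs) s x =
      List.replicate ((c.filter (fun y => y == x)).length) s ++ occList cs (s + 1) x := by
  simp only [occList, flatPairs_cons, List.filter_append, List.filter_map, List.map_append,
    List.map_map]
  have hmr : ∀ (l : List Int), l.map ((fun q : Int × Int => q.2) ∘ (fun x => (x, s)))
      = List.replicate l.length s := by
    intro l
    induction l with
    | nil => rfl
    | cons y l ihl => simp [ihl, List.replicate_succ]
  rw [hmr]
  rfl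

theorem occList_mem (cycles : List (List Int)) (s x i : Int) :
    i ∈ occList cycles s x ↔ ∃ k : Nat, ∃ _ : k < cycles.length, i = s + k ∧ x ∈ cycles[k] := by
  induction cycles generalizing s with
  | nil => simp [occList, flatPairs, PySem.List.enumerate]
  | cons c cs ih =>
    rw [occList_cons]
    simp only [List.mem_append, List.mem_replicate, ih]
    constructor
    · rintro (⟨hne, rfl⟩ | ⟨k, hk, rfl, hx⟩)
      · refine ⟨0, by simp, by simp, ?_⟩
        rcases List.exists_mem_of_length_pos (Nat.pos_of_ne_zero hne) with ⟨y, hy⟩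
        rcases List.mem_filter.mp hy with ⟨hyc, hyx⟩
        have hyx' : y = x := by simpa using hyx
        subst hyx'
        simpa using hyc
      · exact ⟨k + 1, by simpa using hk, by push_cast; ring, by simpa using hx⟩
    · rintro ⟨k, hk, rfl, hx⟩
      cases k with
      | zero =>
        refine Or.inl ⟨?_, by simp⟩
        have : x ∈ c.filter (fun y => y == x) := List.mem_filter.mpr ⟨by simpa using hx, by simp⟩
        exact Nat.pos_iff_ne_zero.mp (List.length_pos_of_mem this)
      | succ k =>
        exact Or.inr ⟨k, by simpa using hk, by push_cast; ring, by simpa using hx⟩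

theorem occList_sorted (cycles : List (List Int)) (s x : Int)
    (hnd : ∀ c ∈ cycles, c.Nodup) : (occList cycles s x).Pairwise (· < ·) := by
  induction cycles generalizing s with
  | nil => simp [occList, flatPairs, PySem.List.enumerate]
  | cons c cs ih =>
    rw [occList_cons]
    refine List.pairwise_append.mpr ⟨?_, ih (s + 1) (fun c hc => hnd c (List.mem_cons_of_mem _ hc)), ?_⟩
    · have hfb : c.filter (fun y => y == x) = List.replicate (c.count x) x := List.filter_beq x
      have hle : c.count x ≤ 1 := List.nodup_iff_count_le_one.mp (hnd c List.mem_cons_self) x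
      rw [hfb, List.length_replicate]
      simp only [List.pairwise_replicate]
      left; omega
    · intro a ha b hb
      rcases List.mem_replicate.mp ha with ⟨_, ha2⟩
      rcases (occList_mem cs (s + 1) x b).mp hb with ⟨k, _, rfl, _⟩
      have hk0 : (0 : Int) ≤ (k : Int) := Int.natCast_nonneg k
      omega

-- membership and nodup through the conflict-building fold
theorem mem_foldl_update (L : List (List Int)) (s : PySem.Set (Int × Int)) (y : Int × Int) :
    y ∈ L.foldl (fun s idxs => PySem.Set.update s (opairs idxs)) s ↔
      y ∈ s ∨ ∃ v ∈ L, y ∈ opairs v := by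
  induction L generalizing s with
  | nil => simp
  | cons v L ih =>
    rw [List.foldl_cons, ih]
    simp only [PySem.Set.mem_update, List.mem_cons]
    constructor
    · rintro ((h | h) | ⟨w, hw, h⟩)
      · exact Or.inl h
      · exact Or.inr ⟨v, Or.inl rfl, h⟩
      · exact Or.inr ⟨w, Or.inr hw, h⟩
    · rintro (h | ⟨w, rfl | hw, h⟩)
      · exact Or.inl (Or.inl h)
      · exact Or.inl (Or.inr h)
      · exact Or.inr ⟨w, hw, h⟩

theorem nodup_foldl_update (L : List (List Int)) (s : PySem.Set (Int × Int)) (h : s.Nodup) :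
    (L.foldl (fun s idxs => PySem.Set.update s (opairs idxs)) s).Nodup := by
  induction L generalizing s with
  | nil => exact h
  | cons v L ih => exact ih _ (PySem.Set.nodup_update _ _ h)

-- the disjointness test A applies to an index pair
def disjB (cycles : List (List Int)) : Int × Int → Bool :=
  fun p => decide (PySem.Set.inter (PySem.List.pyGetD cycles p.1 [])
    (PySem.List.pyGetD cycles p.2 []) = [])

-- all index pairs (i, j) with 0 ≤ i < j < m
def allPairs (m : Nat) : List (Int × Int) := opairs (PySem.List.pyRange 0 (m : Int))

theorem range_sorted (m : Nat) : (PySem.List.pyRange 0 (m : Int)).Pairwise (· < ·) := by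
  rw [PySem.List.pyRange_zero_natCast]
  refine List.pairwise_map.mpr (List.pairwise_lt_range.imp ?_)
  intro a b h
  exact_mod_cast h

theorem range_length (m : Nat) : (PySem.List.pyRange 0 (m : Int)).length = m := by
  rw [PySem.List.pyRange_zero_natCast]
  simp

theorem sum_count (q : Int × Int → Bool) (m : Nat) :
    ∀ (k : Nat) (a : Int), ((m : Int) - a).toNat = k →
      ((PySem.List.pyRange a (m : Int)).map
          (fun i => ((PySem.List.pyRange (i + 1) (m : Int)).countP (fun j => q (i, j)) : Int))).sum
        = ((opairs (PySem.List.pyRange a (m : Int))).countP q : Int) := by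
  intro k
  induction k with
  | zero =>
    intro a ha
    rw [PySem.List.pyRange_one_eq_nil (by omega)]
    simp [opairs]
  | succ k ih =>
    intro a ha
    by_cases hlt : a < (m : Int)
    · rw [PySem.List.pyRange_one_cons hlt]
      simp only [List.map_cons, List.sum_cons]
      rw [opairs_countP, ih (a + 1) (by omega)]
      push_cast
      ring
    · rw [PySem.List.pyRange_one_eq_nil (by omega)]
      simp [opairs]

theorem flat_fst_mem (cycles : List (List Int)) (s x : Int) :
    x ∈ (flatPairs cycles s).map (fun q => q.1) ↔ ∃ c ∈ cycles, x ∈ c := by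
  induction cycles generalizing s with
  | nil => simp [flatPairs, PySem.List.enumerate]
  | cons c cs ih =>
    rw [flatPairs_cons]
    simp only [List.map_append, List.map_map, List.mem_append, ih]
    constructor
    · rintro (h | ⟨c', hc', hx⟩)
      · exact ⟨c, List.mem_cons_self, by simpa using h⟩
      · exact ⟨c', List.mem_cons_of_mem _ hc', hx⟩
    · rintro ⟨c', hc', hx⟩
      rcases List.mem_cons.mp hc' with rfl | hc'
      · exact Or.inl (List.mem_map.mpr ⟨x, hx, rfl⟩)
      · exact Or.inr ⟨c', hc', hx⟩

theorem A_eval (cycles : List (List Int)) :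
    compute_alpha_1_2 cycles =
      ((cycles.length : Int), (((allPairs cycles.length).countP (disjB cycles) : Nat) : Int)) := by
  simp only [compute_alpha_1_2, PySem.List.len_eq]
  congr 1
  simp only [PySem.List.foldl_ite_add_one]
  rw [PySem.List.foldl_add, zero_add]
  exact sum_count (disjB cycles) cycles.length ((cycles.length : Int) - 0).toNat 0 rfl

theorem B_eval (cycles : List (List Int)) (hpre : ∀ c ∈ cycles, c.Nodup) :
    compute_alpha_1_2_alt cycles =
      ((cycles.length : Int), (((allPairs cycles.length).countP (disjB cycles) : Nat) : Int)) := by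
  simp only [compute_alpha_1_2_alt, PySem.List.len_eq, orderedPairs_eq, List.nil_append]
  congr 1
  set m := cycles.length with hm
  set idx := (PySem.List.enumerate cycles).foldl (fun d p =>
      p.2.foldl (fun d x => d.modify x [] (fun l => l ++ [p.1])) d) PySem.Dict.empty with hidx
  have hidxflat : idx = (flatPairs cycles 0).foldl
      (fun d q => d.modify q.1 [] (fun l => l ++ [q.2])) PySem.Dict.empty := by
    rw [hidx, flatPairs, List.foldl_flatMap]
    simp only [List.foldl_map]
  have hgetD : ∀ x : Int, idx.getD x [] = occList cycles 0 x := by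
    intro x
    rw [hidxflat, PySem.Dict.getD_foldl_modify_append, PySem.Dict.getD_empty]
    simp [occList]
  have hkeysnodup : idx.keys.Nodup := by
    rw [hidxflat]
    exact PySem.Dict.nodup_keys_foldl_modify_key _ _ _ _ _ (by simp [PySem.Dict.keys_empty])
  have hkeysmem : ∀ x : Int, x ∈ idx.keys ↔ ∃ c ∈ cycles, x ∈ c := by
    intro x
    rw [hidxflat]
    simp only [PySem.Dict.keys_foldl_modify_key, PySem.Dict.keys_empty]
    rw [PySem.Set.mem_update]
    simp only [List.not_mem_nil, false_or]
    exact flat_fst_mem cycles 0 x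
  have hvals : idx.values = idx.keys.map (fun k => idx.getD k []) :=
    PySem.Dict.values_eq_map_keys idx hkeysnodup []
  set C := idx.values.foldl (fun s idxs => PySem.Set.update s (opairs idxs)) PySem.Set.empty with hC
  have hCmem : ∀ y : Int × Int, y ∈ C ↔ ∃ v ∈ idx.values, y ∈ opairs v := by
    intro y
    rw [hC, mem_foldl_update]
    simp [PySem.Set.empty]
  have hCiff : ∀ y : Int × Int, y ∈ C ↔ y ∈ allPairs m ∧ ¬ (disjB cycles y = true) := by
    rintro ⟨i, j⟩
    rw [hCmem]
    constructor
    · rintro ⟨v, hv, hyv⟩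
      rw [hvals] at hv
      rcases List.mem_map.mp hv with ⟨x, hxk, rfl⟩
      rw [hgetD x] at hyv
      rcases (opairs_mem_of_sorted (occList_sorted cycles 0 x hpre) i j).mp hyv with ⟨hi, hj, hij⟩
      rcases (occList_mem cycles 0 x i).mp hi with ⟨ki, hki, rfl, hxi⟩
      rcases (occList_mem cycles 0 x j).mp hj with ⟨kj, hkj, rfl, hxj⟩
      simp only [zero_add] at hij ⊢
      constructor
      · refine (opairs_mem_of_sorted (range_sorted m) _ _).mpr
          ⟨PySem.List.mem_pyRange_one.mpr ⟨by omega, by exact_mod_cast hki⟩,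
           PySem.List.mem_pyRange_one.mpr ⟨by omega, by exact_mod_cast hkj⟩, hij⟩
      · simp only [disjB, PySem.List.pyGetD_natCast, decide_eq_true_eq]
        intro hnil
        have hxin : x ∈ PySem.Set.inter (cycles.getD ki []) (cycles.getD kj []) :=
          (PySem.Set.mem_inter _ _ x).mpr
            ⟨by rw [List.getD_eq_getElem _ _ hki]; exact hxi,
             by rw [List.getD_eq_getElem _ _ hkj]; exact hxj⟩
        rw [hnil] at hxin
        simp at hxin
    · rintro ⟨hy, hnd⟩
      rcases (opairs_mem_of_sorted (range_sorted m) i j).mp hy with ⟨hi, hj, hij⟩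
      rcases PySem.List.mem_pyRange_one.mp hi with ⟨hi0, him⟩
      rcases PySem.List.mem_pyRange_one.mp hj with ⟨hj0, hjm⟩
      have hieq : i = ((i.toNat : Nat) : Int) := by omega
      have hjeq : j = ((j.toNat : Nat) : Int) := by omega
      have hilt : i.toNat < m := by omega
      have hjlt : j.toNat < m := by omega
      have hne : PySem.Set.inter (cycles.getD i.toNat []) (cycles.getD j.toNat []) ≠ [] := by
        intro h
        apply hnd
        rw [hieq, hjeq] at *
        simp only [disjB, PySem.List.pyGetD_natCast, decide_eq_true_eq]
        exact h
      rcases List.exists_mem_of_ne_nil _ hne with ⟨x, hx⟩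
      rcases (PySem.Set.mem_inter _ _ x).mp hx with ⟨hx1, hx2⟩
      refine ⟨occList cycles 0 x, ?_, ?_⟩
      · rw [hvals]
        refine List.mem_map.mpr ⟨x, ?_, hgetD x⟩
        refine (hkeysmem x).mpr ⟨cycles.getD i.toNat [], ?_, hx1⟩
        rw [List.getD_eq_getElem _ _ (by omega : i.toNat < cycles.length)]
        exact List.getElem_mem _
      · refine (opairs_mem_of_sorted (occList_sorted cycles 0 x hpre) i j).mpr ⟨?_, ?_, hij⟩
        · refine (occList_mem cycles 0 x i).mpr ⟨i.toNat, by omega, by omega, ?_⟩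
          rw [List.getD_eq_getElem _ _ (by omega : i.toNat < cycles.length)] at hx1
          exact hx1
        · refine (occList_mem cycles 0 x j).mpr ⟨j.toNat, by omega, by omega, ?_⟩
          rw [List.getD_eq_getElem _ _ (by omega : j.toNat < cycles.length)] at hx2
          exact hx2
  have hCnodup : C.Nodup := nodup_foldl_update _ _ List.nodup_nil
  have hPn : (allPairs m).Nodup := opairs_nodup (range_sorted m)
  have hperm : C.Perm ((allPairs m).filter (fun y => !(disjB cycles y))) := by
    rw [List.perm_ext_iff_of_nodup hCnodup (hPn.filter _)]
    intro y
    rw [hCiff y, List.mem_filter]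
    simp
  have hlenC : C.length = (allPairs m).countP (fun y => !(disjB cycles y)) := by
    rw [hperm.length_eq, List.countP_eq_length_filter]
  have hsplit : (allPairs m).length
      = (allPairs m).countP (disjB cycles) + (allPairs m).countP (fun y => !(disjB cycles y)) := by
    simpa using List.length_eq_countP_add_countP (disjB cycles) (l := allPairs m)
  have hlen2 : 2 * (allPairs m).length + m = m * m := by
    have h := opairs_length (PySem.List.pyRange 0 (m : Int))
    rw [range_length] at h
    exact h
  have h2L : ((m : Int) * ((m : Int) - 1)) = 2 * ((allPairs m).length : Int) := by
    cases hcase : m with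
    | zero =>
      rw [hcase] at hlen2
      have : (allPairs 0).length = 0 := by omega
      simp [this]
    | succ n =>
      rw [hcase] at hlen2
      have hx : (n + 1) * (n + 1) = (n + 1) * n + (n + 1) := by ring
      rw [hx] at hlen2
      have hnat : (n + 1) * n = 2 * (allPairs (n + 1)).length := by linarith
      have : ((n:Int) + 1) * ((n:Int) + 1 - 1) = ((n:Int) + 1) * (n:Int) := by ring
      push_cast
      rw [this]
      exact_mod_cast hnat
  rw [hlenC, h2L, PySem.Int.floordiv_eq_ediv_of_pos (by norm_num)]
  have hdiv : (2 * ((allPairs m).length : Int)) / 2 = ((allPairs m).length : Int) := by omega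
  rw [hdiv]
  omega

-- ===== VERDICT (by name: the statement is the Claim_ definition above) =====
theorem compute_alpha_1_2_spec : Claim_equal_compute_alpha_1_2 := by
  intro cycles _ hpre
  unfold Spec_compute_alpha_1_2
  rw [A_eval, B_eval cycles hpre]
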